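-- pv_equiv track=rewrite | github.com/pvdwijdeven/DSA_Python3 | G4G/DSA Course/Matrix/MatrixFunctions.py | boolean_matrix
-- ===== SOURCE A (Python) =====
-- def boolean_matrix(matrix):
--     # code here
--     rows = len(matrix)
--     cols = len(matrix[0])
--     row_list = [0] * rows
--     col_list = [0] * cols
--     for row in range(rows):
--         for col in range(cols):
--             if matrix[row][col] == 1:
--                 row_list[row] = 1
--                 col_list[col] = 1
--     for row in range(rows):
--         for col in range(cols):
--             if row_list[row] == 1 or col_list[col] == 1:
--                 matrix[row][col] = 1
--     return matrix
-- ===== SOURCE B (Python) =====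
-- # Classic constant-extra-space variant: use the first row and first column of the
-- # matrix itself as the marker arrays instead of allocating row_list/col_list.
-- def boolean_matrix(matrix):
--     if not matrix or not matrix[0]:
--         return matrix
--     rows, cols = len(matrix), len(matrix[0])
--     first_row_has = any(matrix[0][c] == 1 for c in range(cols))
--     first_col_has = any(matrix[r][0] == 1 for r in range(rows))
--     for r in range(1, rows):
--         for c in range(1, cols):
--             if matrix[r][c] == 1:
--                 matrix[r][0] = 1
--                 matrix[0][c] = 1
--     for r in range(1, rows):
--         for c in range(1, cols):
--             if matrix[r][0] == 1 or matrix[0][c] == 1: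
--                 matrix[r][c] = 1
--     if first_row_has:
--         for c in range(cols):
--             matrix[0][c] = 1
--     if first_col_has:
--         for r in range(rows):
--             matrix[r][0] = 1
--     return matrix
-- ===== Notes on version B (the rewrite author's own statement) =====
-- stated objective: alternative
-- what changed: Replaces A's auxiliary row_list/col_list marker arrays with the classic constant-extra-space scheme that records the markers inside the matrix's own first row and first column (after saving two booleans for row 0 / column 0), then rewrites interior cells from those in-matrix markers and finally fills row 0 / column 0 from the saved booleans; Pre_ excludes only the inputs where A raises IndexError (empty matrix, or a row shorter than row 0).
import Mathlib
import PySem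

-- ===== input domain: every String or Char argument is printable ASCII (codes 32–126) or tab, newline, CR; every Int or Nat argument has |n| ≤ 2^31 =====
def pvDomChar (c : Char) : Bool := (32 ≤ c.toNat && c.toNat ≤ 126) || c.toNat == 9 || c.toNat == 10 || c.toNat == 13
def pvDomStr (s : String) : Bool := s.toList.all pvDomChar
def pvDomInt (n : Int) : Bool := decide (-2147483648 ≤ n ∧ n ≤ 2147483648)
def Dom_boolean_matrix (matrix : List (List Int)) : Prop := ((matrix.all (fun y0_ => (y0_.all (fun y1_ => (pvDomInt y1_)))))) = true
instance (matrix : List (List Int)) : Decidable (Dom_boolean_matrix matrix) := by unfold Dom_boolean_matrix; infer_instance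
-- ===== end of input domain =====

-- B replaces A's auxiliary row_list/col_list marker arrays by the classic constant-extra-space
-- scheme that stores the markers in the matrix's own first row and first column; both Pythons
-- mutate the argument in place and return it, so return-value equivalence is the whole story.

-- ===== PORT A =====
def boolean_matrix (matrix : List (List Int)) : List (List Int) :=
  let rows := matrix.length
  let cols := (matrix.headD []).length
  let flags := (List.range rows).foldl (fun p row =>
      (List.range cols).foldl (fun p col =>
          if (matrix.getD row []).getD col 0 == 1 then (p.1.set row 1, p.2.set col 1) else p) p)
    (List.replicate rows (0:Int), List.replicate cols (0:Int))
  (List.range rows).foldl (fun m row =>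
      (List.range cols).foldl (fun m col =>
          if flags.1.getD row 0 == 1 || flags.2.getD col 0 == 1
          then m.modify row (fun r => r.set col 1) else m) m) matrix

-- ===== PORT B =====
def boolean_matrix_alt (matrix : List (List Int)) : List (List Int) :=
  if matrix.isEmpty || (matrix.headD []).isEmpty then matrix
  else
    let rows := matrix.length
    let cols := (matrix.headD []).length
    let firstRowHas := (List.range cols).any (fun c => (matrix.getD 0 []).getD c 0 == 1)
    let firstColHas := (List.range rows).any (fun r => (matrix.getD r []).getD 0 0 == 1)
    let m1 := (List.range' 1 (rows - 1)).foldl (fun m r =>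
        (List.range' 1 (cols - 1)).foldl (fun m c =>
          if (m.getD r []).getD c 0 == 1 then
            (m.modify r (fun row => row.set 0 1)).modify 0 (fun row => row.set c 1)
          else m) m) matrix
    let m2 := (List.range' 1 (rows - 1)).foldl (fun m r =>
        (List.range' 1 (cols - 1)).foldl (fun m c =>
          if (m.getD r []).getD 0 0 == 1 || (m.getD 0 []).getD c 0 == 1 then
            m.modify r (fun row => row.set c 1)
          else m) m) m1
    let m3 := if firstRowHas then
        (List.range cols).foldl (fun m c => m.modify 0 (fun row => row.set c 1)) m2
      else m2
    if firstColHas then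
      (List.range rows).foldl (fun m r => m.modify r (fun row => row.set 0 1)) m3
    else m3

-- ===== PRECONDITION & SPEC =====
-- Pre_ excludes exactly the inputs on which Python A raises IndexError: the empty matrix
-- (matrix[0]) and matrices with a row shorter than row 0 (matrix[row][col]).
def Pre_boolean_matrix (matrix : List (List Int)) : Prop :=
  matrix ≠ [] ∧ ∀ row ∈ matrix, (matrix.headD []).length ≤ row.length
instance (matrix : List (List Int)) : Decidable (Pre_boolean_matrix matrix) := by
  unfold Pre_boolean_matrix; infer_instance
def pvWitness_boolean_matrix : List (List Int) := [[0, 1], [2, 0]]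

def Spec_boolean_matrix (matrix : List (List Int)) (out : List (List Int)) : Prop := out = boolean_matrix_alt matrix
instance (matrix : List (List Int)) (out : List (List Int)) : Decidable (Spec_boolean_matrix matrix out) := by unfold Spec_boolean_matrix; infer_instance

-- ===== CLAIM (what is proved, stated in full; the proofs are below) =====
def Claim_equal_boolean_matrix : Prop := ∀ (matrix : List (List Int)), Dom_boolean_matrix matrix → Pre_boolean_matrix matrix → Spec_boolean_matrix matrix (boolean_matrix matrix)

-- ===== LEMMAS AND PROOFS =====

-- cell access, the single-cell write, and the shape invariant used throughout
def pvGet (m : List (List Int)) (i j : Nat) : Int := (m.getD i []).getD j 0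
def pvW (m : List (List Int)) (a b : Nat) : List (List Int) := m.modify a (fun row => row.set b 1)
def pvShape (matrix m : List (List Int)) : Prop :=
  m.length = matrix.length ∧ ∀ i, (m.getD i []).length = (matrix.getD i []).length
def pvRowHas (matrix : List (List Int)) (C i : Nat) : Bool :=
  (List.range C).any (fun c => pvGet matrix i c == 1)
def pvColHas (matrix : List (List Int)) (j : Nat) : Bool :=
  matrix.any (fun row => row.getD j 0 == 1)

-- both ports produce the matrix characterised cell-wise by this predicate
def pvChar (matrix out : List (List Int)) : Prop :=
  out.length = matrix.length ∧
  (∀ i, (out.getD i []).length = (matrix.getD i []).length) ∧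
  ∀ i j, i < matrix.length → j < (matrix.getD i []).length →
    pvGet out i j =
      if j < (matrix.headD []).length ∧
          (pvRowHas matrix (matrix.headD []).length i || pvColHas matrix j) = true
      then 1 else pvGet matrix i j

theorem pvChar_unique (matrix o1 o2 : List (List Int))
    (h1 : pvChar matrix o1) (h2 : pvChar matrix o2) : o1 = o2 := by
  obtain ⟨hl1, hr1, hg1⟩ := h1
  obtain ⟨hl2, hr2, hg2⟩ := h2
  apply List.ext_getElem (by omega)
  intro i hi1 hi2
  have him : i < matrix.length := by omega
  have e1 : o1[i] = o1.getD i [] := (List.getD_eq_getElem _ _ hi1).symm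
  have e2 : o2[i] = o2.getD i [] := (List.getD_eq_getElem _ _ hi2).symm
  rw [e1, e2]
  apply List.ext_getElem (by rw [hr1 i, hr2 i])
  intro j hj1 hj2
  have hjm : j < (matrix.getD i []).length := by rw [hr1 i] at hj1; omega
  have g1 : (o1.getD i [])[j] = pvGet o1 i j := (List.getD_eq_getElem _ _ hj1).symm
  have g2 : (o2.getD i [])[j] = pvGet o2 i j := (List.getD_eq_getElem _ _ hj2).symm
  rw [g1, g2, hg1 i j him hjm, hg2 i j him hjm]

theorem pvW_length (m : List (List Int)) (a b : Nat) : (pvW m a b).length = m.length := by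
  simp [pvW]

theorem pvW_rowD (m : List (List Int)) (a b i : Nat) :
    (pvW m a b).getD i [] = if a = i then (m.getD i []).set b 1 else m.getD i [] := by
  simp only [pvW, List.getD, List.getElem?_modify]
  by_cases h : a = i
  · subst h
    rcases hx : m[a]? with _ | row
    · simp [hx, List.getD]
    · simp [hx]
  · simp [h]

theorem pvW_rowlen (m : List (List Int)) (a b i : Nat) :
    ((pvW m a b).getD i []).length = (m.getD i []).length := by
  rw [pvW_rowD]; split <;> simp

theorem pvW_get' (m : List (List Int)) (a b i j : Nat)
    (ha : a < m.length) (hb : b < (m.getD a []).length) :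
    pvGet (pvW m a b) i j = if i = a ∧ j = b then 1 else pvGet m i j := by
  unfold pvGet
  rw [pvW_rowD]
  by_cases hia : i = a
  · subst hia
    rw [if_pos rfl]
    by_cases hjb : j = b
    · subst hjb
      rw [if_pos ⟨rfl, rfl⟩]
      simp only [List.getD] at hb ⊢
      simp [List.getElem?_set, hb]
    · rw [if_neg (by tauto)]
      simp [List.getD, List.getElem?_set, Ne.symm hjb]
  · rw [if_neg (fun h => hia h.symm), if_neg (by tauto)]

-- splitting helpers for A (flags phase)
theorem pv_inner_split (matrix : List (List Int)) (r : Nat) (cs : List Nat)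
    (p : List Int × List Int) :
    cs.foldl (fun p c => if (matrix.getD r []).getD c 0 == 1
        then (p.1.set r 1, p.2.set c 1) else p) p
      = ((if cs.any (fun c => (matrix.getD r []).getD c 0 == 1) then p.1.set r 1 else p.1),
         cs.foldl (fun q c => if (matrix.getD r []).getD c 0 == 1 then q.set c 1 else q) p.2) := by
  induction cs generalizing p with
  | nil => simp
  | cons c cs ih =>
    by_cases h : ((matrix.getD r []).getD c 0 == 1) = true
    · simp only [List.foldl_cons, List.any_cons, h, if_true, Bool.true_or]
      rw [ih]
      by_cases h2 : (cs.any fun c => (matrix.getD r []).getD c 0 == 1) = true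
      · simp [List.set_set]
      · simp
    · have hx : ((matrix.getD r []).getD c 0 == 1) = false := by simpa using h
      simp only [List.foldl_cons, List.any_cons, hx, Bool.false_eq_true, if_false,
        Bool.false_or]
      rw [ih]

theorem pv_outer_split (matrix : List (List Int)) (C : Nat) (rs : List Nat)
    (p : List Int × List Int) :
    rs.foldl (fun p r => (List.range C).foldl (fun p c =>
        if (matrix.getD r []).getD c 0 == 1 then (p.1.set r 1, p.2.set c 1) else p) p) p
      = (rs.foldl (fun rl r =>
            if (List.range C).any (fun c => (matrix.getD r []).getD c 0 == 1)
            then rl.set r 1 else rl) p.1,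
         rs.foldl (fun cl r => (List.range C).foldl (fun q c =>
            if (matrix.getD r []).getD c 0 == 1 then q.set c 1 else q) cl) p.2) := by
  induction rs generalizing p with
  | nil => simp
  | cons r rs ih =>
    simp only [List.foldl_cons]
    rw [pv_inner_split, ih]

theorem pv_setfold_length (p : Nat → Bool) (cs : List Nat) (xs : List Int) :
    (cs.foldl (fun xs c => if p c then xs.set c 1 else xs) xs).length = xs.length := by
  induction cs generalizing xs with
  | nil => rfl
  | cons c cs ih => simp only [List.foldl_cons]; split <;> simp [ih]

theorem pv_setfold_getD (p : Nat → Bool) (cs : List Nat) (hnd : cs.Nodup) (xs : List Int)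
    (i : Nat) (d : Int) :
    (cs.foldl (fun xs c => if p c then xs.set c 1 else xs) xs).getD i d
      = if i ∈ cs ∧ i < xs.length ∧ p i then 1 else xs.getD i d := by
  induction cs generalizing xs with
  | nil => simp
  | cons c cs ih =>
    rcases List.nodup_cons.mp hnd with ⟨hc, hnd'⟩
    simp only [List.foldl_cons]
    rw [ih hnd']
    by_cases hic : i = c
    · subst hic
      simp only [List.mem_cons, true_or, true_and]
      have hni : i ∉ cs := hc
      by_cases hp : p i
      · simp only [hp, and_true]
        by_cases hl : i < xs.length
        · simp [hni, List.getD, hl]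
        · have : xs.set i 1 = xs := List.set_eq_of_length_le (by omega)
          simp [hni, this, hl]
      · simp [hp, hni]
    · have hset : ∀ ys : List Int, (if p c then ys.set c 1 else ys).getD i d = ys.getD i d := by
        intro ys
        split
        · simp [List.getD, Ne.symm hic]
        · rfl
      have hlen : (if p c then xs.set c 1 else xs).length = xs.length := by split <;> simp
      rw [hset, hlen]
      simp [List.mem_cons, hic]

theorem pv_cl_getD (matrix : List (List Int)) (C : Nat) (rs : List Nat) (cl : List Int)
    (hl : cl.length = C) (c : Nat) :
    (rs.foldl (fun cl r => (List.range C).foldl (fun q c =>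
        if (matrix.getD r []).getD c 0 == 1 then q.set c 1 else q) cl) cl).getD c 0
      = if c < C ∧ rs.any (fun r => (matrix.getD r []).getD c 0 == 1) then 1
        else cl.getD c 0 := by
  induction rs generalizing cl with
  | nil => simp
  | cons r rs ih =>
    simp only [List.foldl_cons, List.any_cons]
    have hl2 : (List.foldl (fun q c =>
        if ((matrix.getD r []).getD c 0 == 1) = true then q.set c 1 else q)
        cl (List.range C)).length = C := by
      rw [pv_setfold_length]; exact hl
    rw [ih _ hl2, pv_setfold_getD _ _ List.nodup_range, hl]
    by_cases hcC : c < C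
    · simp only [List.mem_range, hcC, true_and]
      split_ifs <;> simp_all <;> tauto
    · simp [hcC]

theorem pv_modify_modify {α : Type} (l : List α) (i : Nat) (f g : α → α) :
    (l.modify i f).modify i g = l.modify i (fun x => g (f x)) := by
  apply List.ext_getElem?
  intro j
  simp [List.getElem?_modify]
  rcases l[j]? with _ | a <;> by_cases h : i = j <;> simp [h]

theorem pv_modify_id {α : Type} (l : List α) (i : Nat) :
    l.modify i (fun x => x) = l := by
  apply List.ext_getElem?
  intro j
  simp [List.getElem?_modify]

theorem pv_phase2_inner (r : Nat) (q : Nat → Bool) (cs : List Nat) (m : List (List Int)) :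
    cs.foldl (fun m c => if q c then m.modify r (fun row => row.set c 1) else m) m
      = m.modify r (fun row => cs.foldl (fun row c => if q c then row.set c 1 else row) row) := by
  induction cs generalizing m with
  | nil => simp [pv_modify_id]
  | cons c cs ih =>
    simp only [List.foldl_cons]
    by_cases h : q c = true
    · simp only [h, if_true]
      rw [ih, pv_modify_modify]
    · simp only [if_neg h]
      rw [ih]

theorem pv_modfold_length (g : Nat → List Int → List Int) (rs : List Nat)
    (m : List (List Int)) :
    (rs.foldl (fun m r => m.modify r (g r)) m).length = m.length := by
  induction rs generalizing m with
  | nil => rfl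
  | cons r rs ih => simp [List.foldl_cons, ih]

theorem pv_modfold_getD (g : Nat → List Int → List Int) (rs : List Nat) (hnd : rs.Nodup)
    (m : List (List Int)) (r : Nat) :
    (rs.foldl (fun m r => m.modify r (g r)) m).getD r []
      = if r ∈ rs ∧ r < m.length then g r (m.getD r []) else m.getD r [] := by
  induction rs generalizing m with
  | nil => simp
  | cons r' rs ih =>
    rcases List.nodup_cons.mp hnd with ⟨hc, hnd'⟩
    simp only [List.foldl_cons]
    rw [ih hnd']
    by_cases hrr : r = r'
    · subst hrr
      have hni : r ∉ rs := hc
      simp only [List.mem_cons, true_or, true_and, List.length_modify]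
      by_cases hl : r < m.length
      · have : (m.modify r (g r)).getD r [] = g r (m.getD r []) := by
          simp [List.getD, List.getElem?_modify, List.getElem?_eq_getElem hl]
        simp [hni, hl]
      · have : m.modify r (g r) = m := List.modify_eq_self (by omega)
        simp [hni, hl]
    · have : (m.modify r' (g r')).getD r [] = m.getD r [] := by
        simp [List.getD, Ne.symm hrr]
      rw [List.length_modify, this]
      simp [List.mem_cons, hrr]

theorem pv_range_any (matrix : List (List Int)) (p : List Int → Bool) :
    (List.range matrix.length).any (fun r => p (matrix.getD r [])) = matrix.any p := by
  apply Bool.coe_iff_coe.mp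
  simp only [List.any_eq_true, List.mem_range]
  constructor
  · rintro ⟨r, hr, hp⟩
    exact ⟨matrix[r], List.getElem_mem _, by rwa [List.getD_eq_getElem _ _ hr] at hp⟩
  · rintro ⟨row, hmem, hp⟩
    rcases List.mem_iff_getElem.mp hmem with ⟨r, hr, rfl⟩
    exact ⟨r, hr, by rwa [List.getD_eq_getElem _ _ hr]⟩

-- A satisfies the characterisation
theorem pv_char_a (matrix : List (List Int)) (hpre : Pre_boolean_matrix matrix) :
    pvChar matrix (boolean_matrix matrix) := by
  obtain ⟨hne, hrows⟩ := hpre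
  simp only [boolean_matrix]
  set R := matrix.length with hR
  set C := (matrix.headD []).length with hC
  rw [pv_outer_split]
  set rl := (List.range R).foldl (fun rl r =>
      if (List.range C).any (fun c => (matrix.getD r []).getD c 0 == 1)
      then rl.set r 1 else rl) (List.replicate R (0:Int)) with hrl
  set cl := (List.range R).foldl (fun cl r => (List.range C).foldl (fun q c =>
      if (matrix.getD r []).getD c 0 == 1 then q.set c 1 else q) cl)
      (List.replicate C (0:Int)) with hcl
  have hrlD : ∀ r : Nat, rl.getD r 0
      = if r < R ∧ (List.range C).any (fun c => (matrix.getD r []).getD c 0 == 1)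
        then 1 else 0 := by
    intro r
    rw [hrl, pv_setfold_getD _ _ List.nodup_range]
    simp only [List.mem_range, List.length_replicate]
    by_cases hr : r < R
    · by_cases hp : ((List.range C).any fun c => (matrix.getD r []).getD c 0 == 1) = true
      · rw [if_pos ⟨hr, hr, hp⟩, if_pos ⟨hr, hp⟩]
      · rw [if_neg (by tauto), if_neg (by tauto)]
        simp only [List.getD, List.getElem?_replicate]
        split_ifs <;> rfl
    · rw [if_neg (by tauto), if_neg (by tauto)]
      simp only [List.getD, List.getElem?_replicate]
      split_ifs <;> rfl
  have hclD : ∀ c : Nat, cl.getD c 0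
      = if c < C ∧ matrix.any (fun row => row.getD c 0 == 1) then 1 else 0 := by
    intro c
    rw [hcl, pv_cl_getD _ _ _ _ (by simp) c]
    rw [pv_range_any matrix (fun row => row.getD c 0 == 1)]
    by_cases h : c < C <;> simp [h]
  have hfun : (fun (m : List (List Int)) (row : Nat) =>
        (List.range C).foldl (fun m col =>
          if rl.getD row 0 == 1 || cl.getD col 0 == 1
          then m.modify row (fun r => r.set col 1) else m) m)
      = (fun (m : List (List Int)) (row : Nat) => m.modify row (fun rw0 =>
          (List.range C).foldl (fun rw0 col =>
            if rl.getD row 0 == 1 || cl.getD col 0 == 1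
            then rw0.set col 1 else rw0) rw0)) := by
    funext m' row
    exact pv_phase2_inner row (fun col => rl.getD row 0 == 1 || cl.getD col 0 == 1)
      (List.range C) m'
  rw [hfun]
  refine ⟨by rw [pv_modfold_length], ?_, ?_⟩
  · intro i
    rw [pv_modfold_getD _ _ List.nodup_range]
    split
    · rw [pv_setfold_length]
    · rfl
  · intro i j hi hj
    unfold pvGet
    rw [pv_modfold_getD _ _ List.nodup_range, if_pos ⟨List.mem_range.mpr hi, hi⟩,
        pv_setfold_getD _ _ List.nodup_range]
    have hR1 : (rl.getD i 0 == 1) = pvRowHas matrix C i := by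
      rw [hrlD i]
      unfold pvRowHas pvGet
      cases hA : ((List.range C).any fun c => (matrix.getD i []).getD c 0 == 1) <;>
        simp [hA, hi] <;> omega
    have hC1 : ∀ hjC : j < C, (cl.getD j 0 == 1) = pvColHas matrix j := by
      intro hjC
      rw [hclD j]
      unfold pvColHas
      cases hA : matrix.any (fun row => row.getD j 0 == 1) <;> simp [hA, hjC]
    by_cases hjC : j < C
    · have hcond1 : (j ∈ List.range C ∧ j < (matrix.getD i []).length ∧
          (rl.getD i 0 == 1 || cl.getD j 0 == 1) = true)
          ↔ (j < C ∧ (pvRowHas matrix C i || pvColHas matrix j) = true) := by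
        rw [hR1, hC1 hjC]
        simp only [List.mem_range]
        constructor
        · rintro ⟨_, _, h⟩; exact ⟨hjC, h⟩
        · rintro ⟨_, h⟩; exact ⟨hjC, hj, h⟩
      rw [if_congr hcond1 rfl rfl]
    · rw [if_neg (fun h => hjC (List.mem_range.mp h.1)), if_neg (fun h => hjC h.1)]

def pvStep1 (r : Nat) (m : List (List Int)) (c : Nat) : List (List Int) :=
  if (m.getD r []).getD c 0 == 1 then
    (m.modify r (fun row => row.set 0 1)).modify 0 (fun row => row.set c 1)
  else m

def pvStep2 (r : Nat) (m : List (List Int)) (c : Nat) : List (List Int) :=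
  if (m.getD r []).getD 0 0 == 1 || (m.getD 0 []).getD c 0 == 1 then
    m.modify r (fun row => row.set c 1)
  else m

theorem pv_headD_getD (l : List (List Int)) : l.getD 0 [] = l.headD [] := by
  cases l <;> rfl

-- pass 1 of B, inner loop over the columns of one row
theorem pv_inner1 (matrix : List (List Int)) (hne : matrix ≠ [])
    (hCle : ∀ i, i < matrix.length → (matrix.headD []).length ≤ (matrix.getD i []).length)
    (r : Nat) (hr1 : 1 ≤ r) (hr2 : r < matrix.length)
    (cs : List Nat) (hcs : ∀ c ∈ cs, 1 ≤ c ∧ c < (matrix.headD []).length)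
    (m : List (List Int)) (hs : pvShape matrix m)
    (hint : ∀ i j, 1 ≤ i → 1 ≤ j → pvGet m i j = pvGet matrix i j) :
    pvShape matrix (cs.foldl (pvStep1 r) m) ∧
    (∀ i j, 1 ≤ i → 1 ≤ j → pvGet (cs.foldl (pvStep1 r) m) i j = pvGet matrix i j) ∧
    (∀ i j, pvGet (cs.foldl (pvStep1 r) m) i j =
      if (i = r ∧ j = 0 ∧ cs.any (fun c => pvGet matrix r c == 1) = true)
         ∨ (i = 0 ∧ j ∈ cs ∧ (pvGet matrix r j == 1) = true) then 1 else pvGet m i j) := by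
  induction cs generalizing m with
  | nil => exact ⟨hs, hint, fun i j => by simp⟩
  | cons c cs ih =>
    obtain ⟨hc1, hcC⟩ := hcs c List.mem_cons_self
    have hm0 : 0 < m.length := by rw [hs.1]; omega
    have hmr : r < m.length := by rw [hs.1]; exact hr2
    have hrow0 : (m.getD 0 []).length = (matrix.headD []).length := by
      rw [hs.2 0, pv_headD_getD]
    have hrowr0 : 0 < (m.getD r []).length := by
      rw [hs.2 r]; have := hCle r hr2; omega
    simp only [List.foldl_cons]
    have hcond : ((m.getD r []).getD c 0 == 1) = (pvGet matrix r c == 1) := by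
      rw [show (m.getD r []).getD c 0 = pvGet m r c from rfl, hint r c hr1 hc1]
    by_cases hA : (pvGet matrix r c == 1) = true
    · have hstep : pvStep1 r m c = pvW (pvW m r 0) 0 c := by
        unfold pvStep1
        rw [hcond, if_pos hA]; rfl
      have hs1 : pvShape matrix (pvW (pvW m r 0) 0 c) :=
        ⟨by rw [pvW_length, pvW_length]; exact hs.1,
         fun i => by rw [pvW_rowlen, pvW_rowlen]; exact hs.2 i⟩
      have hget1 : ∀ i j, pvGet (pvW (pvW m r 0) 0 c) i j =
          if (i = 0 ∧ j = c) ∨ (i = r ∧ j = 0) then 1 else pvGet m i j := by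
        intro i j
        rw [pvW_get' _ _ _ _ _ (by rw [pvW_length]; exact hm0)
              (by rw [pvW_rowlen, hrow0]; exact hcC)]
        by_cases h0 : i = 0 ∧ j = c
        · rw [if_pos h0, if_pos (Or.inl h0)]
        · rw [if_neg h0, pvW_get' _ _ _ _ _ hmr hrowr0]
          by_cases h1 : i = r ∧ j = 0
          · rw [if_pos h1, if_pos (Or.inr h1)]
          · rw [if_neg h1, if_neg (by tauto)]
      have hint1 : ∀ i j, 1 ≤ i → 1 ≤ j →
          pvGet (pvW (pvW m r 0) 0 c) i j = pvGet matrix i j := by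
        intro i j hi hj
        rw [hget1, if_neg (by rintro (⟨h, -⟩ | ⟨-, h⟩) <;> omega)]
        exact hint i j hi hj
      rw [hstep]
      obtain ⟨ihs, ihint, ihget⟩ :=
        ih (fun c hc => hcs c (List.mem_cons_of_mem _ hc)) _ hs1 hint1
      refine ⟨ihs, ihint, ?_⟩
      intro i j
      rw [ihget i j, hget1 i j]
      by_cases h2 : (i = r ∧ j = 0 ∧ cs.any (fun c => pvGet matrix r c == 1) = true)
          ∨ (i = 0 ∧ j ∈ cs ∧ (pvGet matrix r j == 1) = true)
      · rw [if_pos h2, if_pos ?_]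
        rcases h2 with ⟨h1, h2, h3⟩ | ⟨h1, h2, h3⟩
        · exact Or.inl ⟨h1, h2, by simp [List.any_cons, h3]⟩
        · exact Or.inr ⟨h1, List.mem_cons_of_mem _ h2, h3⟩
      · rw [if_neg h2]
        by_cases hw : (i = 0 ∧ j = c) ∨ (i = r ∧ j = 0)
        · rw [if_pos hw, if_pos ?_]
          rcases hw with ⟨h1, h2⟩ | ⟨h1, h2⟩
          · exact Or.inr ⟨h1, by rw [h2]; exact List.mem_cons_self, by rw [h2]; exact hA⟩
          · exact Or.inl ⟨h1, h2, by simp [List.any_cons, hA]⟩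
        · rw [if_neg hw, if_neg ?_]
          rintro (⟨g1, g2, g3⟩ | ⟨g1, g2, g3⟩)
          · exact hw (Or.inr ⟨g1, g2⟩)
          · rcases List.mem_cons.mp g2 with rfl | g2'
            · exact hw (Or.inl ⟨g1, rfl⟩)
            · exact h2 (Or.inr ⟨g1, g2', g3⟩)
    · have hA' : (pvGet matrix r c == 1) = false := by simpa using hA
      have hstep : pvStep1 r m c = m := by
        unfold pvStep1
        rw [hcond, if_neg hA]
      rw [hstep]
      obtain ⟨ihs, ihint, ihget⟩ :=
        ih (fun c hc => hcs c (List.mem_cons_of_mem _ hc)) m hs hint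
      refine ⟨ihs, ihint, fun i j => ?_⟩
      rw [ihget i j]
      refine if_congr ?_ rfl rfl
      simp only [List.any_cons, hA', Bool.false_or, List.mem_cons]
      constructor
      · rintro (⟨h1, h2, h3⟩ | ⟨h1, h2, h3⟩)
        · exact Or.inl ⟨h1, h2, h3⟩
        · exact Or.inr ⟨h1, Or.inr h2, h3⟩
      · rintro (⟨h1, h2, h3⟩ | ⟨h1, h2, h3⟩)
        · exact Or.inl ⟨h1, h2, h3⟩
        · rcases h2 with rfl | h2
          · rw [hA'] at h3; exact absurd h3 (by simp)
          · exact Or.inr ⟨h1, h2, h3⟩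

-- pass 1 of B, outer loop over the rows
theorem pv_outer1 (matrix : List (List Int)) (hne : matrix ≠ [])
    (hCle : ∀ i, i < matrix.length → (matrix.headD []).length ≤ (matrix.getD i []).length)
    (rs : List Nat) (hrs : ∀ r ∈ rs, 1 ≤ r ∧ r < matrix.length)
    (cs : List Nat) (hcs : ∀ c ∈ cs, 1 ≤ c ∧ c < (matrix.headD []).length)
    (m : List (List Int)) (hs : pvShape matrix m)
    (hint : ∀ i j, 1 ≤ i → 1 ≤ j → pvGet m i j = pvGet matrix i j) :
    pvShape matrix (rs.foldl (fun m r => cs.foldl (pvStep1 r) m) m) ∧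
    (∀ i j, 1 ≤ i → 1 ≤ j →
      pvGet (rs.foldl (fun m r => cs.foldl (pvStep1 r) m) m) i j = pvGet matrix i j) ∧
    (∀ i j, pvGet (rs.foldl (fun m r => cs.foldl (pvStep1 r) m) m) i j =
      if (i ∈ rs ∧ j = 0 ∧ cs.any (fun c => pvGet matrix i c == 1) = true)
         ∨ (i = 0 ∧ j ∈ cs ∧ rs.any (fun r => pvGet matrix r j == 1) = true)
      then 1 else pvGet m i j) := by
  induction rs generalizing m with
  | nil => exact ⟨hs, hint, fun i j => by simp⟩
  | cons r rs ih =>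
    obtain ⟨hr1, hr2⟩ := hrs r List.mem_cons_self
    simp only [List.foldl_cons]
    obtain ⟨hs1, hint1, hget1⟩ := pv_inner1 matrix hne hCle r hr1 hr2 cs hcs m hs hint
    obtain ⟨ihs, ihint, ihget⟩ :=
      ih (fun r hr => hrs r (List.mem_cons_of_mem _ hr)) _ hs1 hint1
    refine ⟨ihs, ihint, fun i j => ?_⟩
    rw [ihget i j, hget1 i j]
    by_cases h2 : (i ∈ rs ∧ j = 0 ∧ cs.any (fun c => pvGet matrix i c == 1) = true)
        ∨ (i = 0 ∧ j ∈ cs ∧ rs.any (fun r => pvGet matrix r j == 1) = true)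
    · rw [if_pos h2, if_pos ?_]
      rcases h2 with ⟨g1, g2, g3⟩ | ⟨g1, g2, g3⟩
      · exact Or.inl ⟨List.mem_cons_of_mem _ g1, g2, g3⟩
      · exact Or.inr ⟨g1, g2, by simp [List.any_cons, g3]⟩
    · rw [if_neg h2]
      by_cases hw : (i = r ∧ j = 0 ∧ cs.any (fun c => pvGet matrix r c == 1) = true)
          ∨ (i = 0 ∧ j ∈ cs ∧ (pvGet matrix r j == 1) = true)
      · rw [if_pos hw, if_pos ?_]
        rcases hw with ⟨g1, g2, g3⟩ | ⟨g1, g2, g3⟩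
        · subst g1
          exact Or.inl ⟨List.mem_cons_self, g2, g3⟩
        · exact Or.inr ⟨g1, g2, by simp [List.any_cons, g3]⟩
      · rw [if_neg hw, if_neg ?_]
        rintro (⟨g1, g2, g3⟩ | ⟨g1, g2, g3⟩)
        · rcases List.mem_cons.mp g1 with rfl | g1'
          · exact hw (Or.inl ⟨rfl, g2, g3⟩)
          · exact h2 (Or.inl ⟨g1', g2, g3⟩)
        · rcases (by simpa [List.any_cons] using g3 :
              pvGet matrix r j = 1 ∨ ∃ x ∈ rs, pvGet matrix x j = 1) with g3' | g3'
          · exact hw (Or.inr ⟨g1, g2, by simpa using g3'⟩)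
          · exact h2 (Or.inr ⟨g1, g2, by simpa [List.any_eq_true] using g3'⟩)

-- pass 2 of B, inner loop over the columns of one row
theorem pv_inner2 (matrix m1 : List (List Int))
    (hCle : ∀ i, i < matrix.length → (matrix.headD []).length ≤ (matrix.getD i []).length)
    (r : Nat) (hr1 : 1 ≤ r) (hr2 : r < matrix.length)
    (cs : List Nat) (hcs : ∀ c ∈ cs, 1 ≤ c ∧ c < (matrix.headD []).length)
    (m : List (List Int)) (hs : pvShape matrix m)
    (hb : ∀ i j, (i = 0 ∨ j = 0) → pvGet m i j = pvGet m1 i j) :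
    pvShape matrix (cs.foldl (pvStep2 r) m) ∧
    (∀ i j, (i = 0 ∨ j = 0) → pvGet (cs.foldl (pvStep2 r) m) i j = pvGet m1 i j) ∧
    (∀ i j, pvGet (cs.foldl (pvStep2 r) m) i j =
      if i = r ∧ j ∈ cs ∧ (pvGet m1 r 0 == 1 || pvGet m1 0 j == 1) = true
      then 1 else pvGet m i j) := by
  induction cs generalizing m with
  | nil => exact ⟨hs, hb, fun i j => by simp⟩
  | cons c cs ih =>
    obtain ⟨hc1, hcC⟩ := hcs c List.mem_cons_self
    have hmr : r < m.length := by rw [hs.1]; exact hr2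
    have hrowr : c < (m.getD r []).length := by
      rw [hs.2 r]; have := hCle r hr2; omega
    simp only [List.foldl_cons]
    have hcond : ((m.getD r []).getD 0 0 == 1 || (m.getD 0 []).getD c 0 == 1)
        = (pvGet m1 r 0 == 1 || pvGet m1 0 c == 1) := by
      rw [show (m.getD r []).getD 0 0 = pvGet m r 0 from rfl,
          show (m.getD 0 []).getD c 0 = pvGet m 0 c from rfl,
          hb r 0 (Or.inr rfl), hb 0 c (Or.inl rfl)]
    by_cases hA : (pvGet m1 r 0 == 1 || pvGet m1 0 c == 1) = true
    · have hstep : pvStep2 r m c = pvW m r c := by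
        unfold pvStep2
        rw [hcond, if_pos hA]; rfl
      have hs1 : pvShape matrix (pvW m r c) :=
        ⟨by rw [pvW_length]; exact hs.1, fun i => by rw [pvW_rowlen]; exact hs.2 i⟩
      have hget1 : ∀ i j, pvGet (pvW m r c) i j =
          if i = r ∧ j = c then 1 else pvGet m i j := fun i j =>
        pvW_get' m r c i j hmr hrowr
      have hb1 : ∀ i j, (i = 0 ∨ j = 0) → pvGet (pvW m r c) i j = pvGet m1 i j := by
        intro i j hij
        rw [hget1, if_neg (by rintro ⟨rfl, rfl⟩; rcases hij with h | h <;> omega)]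
        exact hb i j hij
      rw [hstep]
      obtain ⟨ihs, ihb, ihget⟩ :=
        ih (fun c hc => hcs c (List.mem_cons_of_mem _ hc)) _ hs1 hb1
      refine ⟨ihs, ihb, fun i j => ?_⟩
      rw [ihget i j, hget1 i j]
      by_cases h2 : i = r ∧ j ∈ cs ∧ (pvGet m1 r 0 == 1 || pvGet m1 0 j == 1) = true
      · rw [if_pos h2, if_pos ⟨h2.1, List.mem_cons_of_mem _ h2.2.1, h2.2.2⟩]
      · rw [if_neg h2]
        by_cases hw : i = r ∧ j = c
        · rw [if_pos hw, if_pos ⟨hw.1, by rw [hw.2]; exact List.mem_cons_self,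
            by rw [hw.2]; exact hA⟩]
        · rw [if_neg hw, if_neg ?_]
          rintro ⟨g1, g2, g3⟩
          rcases List.mem_cons.mp g2 with rfl | g2'
          · exact hw ⟨g1, rfl⟩
          · exact h2 ⟨g1, g2', g3⟩
    · have hstep : pvStep2 r m c = m := by
        unfold pvStep2
        rw [hcond, if_neg hA]
      rw [hstep]
      obtain ⟨ihs, ihb, ihget⟩ :=
        ih (fun c hc => hcs c (List.mem_cons_of_mem _ hc)) m hs hb
      refine ⟨ihs, ihb, fun i j => ?_⟩
      rw [ihget i j]
      refine if_congr ?_ rfl rfl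
      constructor
      · rintro ⟨g1, g2, g3⟩
        exact ⟨g1, List.mem_cons_of_mem _ g2, g3⟩
      · rintro ⟨g1, g2, g3⟩
        rcases List.mem_cons.mp g2 with rfl | g2'
        · exact absurd g3 hA
        · exact ⟨g1, g2', g3⟩

-- pass 2 of B, outer loop over the rows
theorem pv_outer2 (matrix m1 : List (List Int))
    (hCle : ∀ i, i < matrix.length → (matrix.headD []).length ≤ (matrix.getD i []).length)
    (rs : List Nat) (hrs : ∀ r ∈ rs, 1 ≤ r ∧ r < matrix.length)
    (cs : List Nat) (hcs : ∀ c ∈ cs, 1 ≤ c ∧ c < (matrix.headD []).length)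
    (m : List (List Int)) (hs : pvShape matrix m)
    (hb : ∀ i j, (i = 0 ∨ j = 0) → pvGet m i j = pvGet m1 i j) :
    pvShape matrix (rs.foldl (fun m r => cs.foldl (pvStep2 r) m) m) ∧
    (∀ i j, pvGet (rs.foldl (fun m r => cs.foldl (pvStep2 r) m) m) i j =
      if i ∈ rs ∧ j ∈ cs ∧ (pvGet m1 i 0 == 1 || pvGet m1 0 j == 1) = true
      then 1 else pvGet m i j) := by
  induction rs generalizing m with
  | nil => exact ⟨hs, fun i j => by simp⟩
  | cons r rs ih =>
    obtain ⟨hr1, hr2⟩ := hrs r List.mem_cons_self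
    simp only [List.foldl_cons]
    obtain ⟨hs1, hb1, hget1⟩ := pv_inner2 matrix m1 hCle r hr1 hr2 cs hcs m hs hb
    obtain ⟨ihs, ihget⟩ := ih (fun r hr => hrs r (List.mem_cons_of_mem _ hr)) _ hs1 hb1
    refine ⟨ihs, fun i j => ?_⟩
    rw [ihget i j, hget1 i j]
    by_cases h2 : i ∈ rs ∧ j ∈ cs ∧ (pvGet m1 i 0 == 1 || pvGet m1 0 j == 1) = true
    · rw [if_pos h2, if_pos ⟨List.mem_cons_of_mem _ h2.1, h2.2⟩]
    · rw [if_neg h2]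
      by_cases hw : i = r ∧ j ∈ cs ∧ (pvGet m1 r 0 == 1 || pvGet m1 0 j == 1) = true
      · rw [if_pos hw, if_pos ?_]
        obtain ⟨g1, g2, g3⟩ := hw
        subst g1
        exact ⟨List.mem_cons_self, g2, g3⟩
      · rw [if_neg hw, if_neg ?_]
        rintro ⟨g1, g2, g3⟩
        rcases List.mem_cons.mp g1 with rfl | g1'
        · exact hw ⟨rfl, g2, g3⟩
        · exact h2 ⟨g1', g2, g3⟩

-- the final fills of row 0 and column 0
theorem pv_fill_row (matrix : List (List Int)) (cs : List Nat)
    (hcs : ∀ c ∈ cs, c < (matrix.headD []).length) (hm0 : 0 < matrix.length)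
    (m : List (List Int)) (hs : pvShape matrix m) :
    pvShape matrix (cs.foldl (fun m c => m.modify 0 (fun row => row.set c 1)) m) ∧
    (∀ i j, pvGet (cs.foldl (fun m c => m.modify 0 (fun row => row.set c 1)) m) i j =
      if i = 0 ∧ j ∈ cs then 1 else pvGet m i j) := by
  induction cs generalizing m with
  | nil => exact ⟨hs, fun i j => by simp⟩
  | cons c cs ih =>
    have hcC := hcs c List.mem_cons_self
    simp only [List.foldl_cons]
    have hstep : m.modify 0 (fun row => row.set c 1) = pvW m 0 c := rfl
    have hs1 : pvShape matrix (pvW m 0 c) :=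
      ⟨by rw [pvW_length]; exact hs.1, fun i => by rw [pvW_rowlen]; exact hs.2 i⟩
    have hget1 : ∀ i j, pvGet (pvW m 0 c) i j = if i = 0 ∧ j = c then 1 else pvGet m i j :=
      fun i j => pvW_get' m 0 c i j (by rw [hs.1]; exact hm0)
        (by rw [hs.2 0, pv_headD_getD]; exact hcC)
    rw [hstep]
    obtain ⟨ihs, ihget⟩ := ih (fun c hc => hcs c (List.mem_cons_of_mem _ hc)) _ hs1
    refine ⟨ihs, fun i j => ?_⟩
    rw [ihget i j, hget1 i j]
    by_cases h2 : i = 0 ∧ j ∈ cs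
    · rw [if_pos h2, if_pos ⟨h2.1, List.mem_cons_of_mem _ h2.2⟩]
    · rw [if_neg h2]
      by_cases hw : i = 0 ∧ j = c
      · rw [if_pos hw, if_pos ⟨hw.1, by rw [hw.2]; exact List.mem_cons_self⟩]
      · rw [if_neg hw, if_neg ?_]
        rintro ⟨g1, g2⟩
        rcases List.mem_cons.mp g2 with rfl | g2'
        · exact hw ⟨g1, rfl⟩
        · exact h2 ⟨g1, g2'⟩

theorem pv_fill_col (matrix : List (List Int)) (rs : List Nat)
    (hrs : ∀ r ∈ rs, r < matrix.length ∧ 0 < (matrix.getD r []).length)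
    (m : List (List Int)) (hs : pvShape matrix m) :
    pvShape matrix (rs.foldl (fun m r => m.modify r (fun row => row.set 0 1)) m) ∧
    (∀ i j, pvGet (rs.foldl (fun m r => m.modify r (fun row => row.set 0 1)) m) i j =
      if j = 0 ∧ i ∈ rs then 1 else pvGet m i j) := by
  induction rs generalizing m with
  | nil => exact ⟨hs, fun i j => by simp⟩
  | cons r rs ih =>
    obtain ⟨hr2, hr0⟩ := hrs r List.mem_cons_self
    simp only [List.foldl_cons]
    have hstep : m.modify r (fun row => row.set 0 1) = pvW m r 0 := rfl
    have hs1 : pvShape matrix (pvW m r 0) :=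
      ⟨by rw [pvW_length]; exact hs.1, fun i => by rw [pvW_rowlen]; exact hs.2 i⟩
    have hget1 : ∀ i j, pvGet (pvW m r 0) i j = if i = r ∧ j = 0 then 1 else pvGet m i j :=
      fun i j => pvW_get' m r 0 i j (by rw [hs.1]; exact hr2) (by rw [hs.2 r]; exact hr0)
    rw [hstep]
    obtain ⟨ihs, ihget⟩ := ih (fun r hr => hrs r (List.mem_cons_of_mem _ hr)) _ hs1
    refine ⟨ihs, fun i j => ?_⟩
    rw [ihget i j, hget1 i j]
    by_cases h2 : j = 0 ∧ i ∈ rs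
    · rw [if_pos h2, if_pos ⟨h2.1, List.mem_cons_of_mem _ h2.2⟩]
    · rw [if_neg h2]
      by_cases hw : i = r ∧ j = 0
      · rw [if_pos hw, if_pos ⟨hw.2, by rw [hw.1]; exact List.mem_cons_self⟩]
      · rw [if_neg hw, if_neg ?_]
        rintro ⟨g1, g2⟩
        rcases List.mem_cons.mp g2 with rfl | g2'
        · exact hw ⟨rfl, g1⟩
        · exact h2 ⟨g1, g2'⟩

-- splitting a row/column test into its first entry and the rest
theorem pv_rowHas_split (matrix : List (List Int)) (C i : Nat) (hC : 1 ≤ C) :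
    pvRowHas matrix C i
      = (pvGet matrix i 0 == 1 || (List.range' 1 (C - 1)).any (fun c => pvGet matrix i c == 1)) := by
  unfold pvRowHas
  rw [List.range_eq_range', show C = (C - 1) + 1 by omega, List.range'_succ]
  simp [List.any_cons]

theorem pv_colHas_split (matrix : List (List Int)) (j : Nat) (hne : matrix ≠ []) :
    pvColHas matrix j
      = (pvGet matrix 0 j == 1
          || (List.range' 1 (matrix.length - 1)).any (fun r => pvGet matrix r j == 1)) := by
  unfold pvColHas
  rw [← pv_range_any matrix (fun row => row.getD j 0 == 1)]
  have hlen : 1 ≤ matrix.length := by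
    cases matrix with
    | nil => exact absurd rfl hne
    | cons a l => simp
  rw [List.range_eq_range', show matrix.length = (matrix.length - 1) + 1 by omega,
      List.range'_succ]
  simp [List.any_cons, pvGet]

-- the stages of B, named for the proof (each is definitionally the corresponding stage of the port)
def pvM1 (matrix : List (List Int)) : List (List Int) :=
  (List.range' 1 (matrix.length - 1)).foldl
    (fun m r => (List.range' 1 ((matrix.headD []).length - 1)).foldl (pvStep1 r) m) matrix
def pvM2 (matrix : List (List Int)) : List (List Int) :=
  (List.range' 1 (matrix.length - 1)).foldl
    (fun m r => (List.range' 1 ((matrix.headD []).length - 1)).foldl (pvStep2 r) m) (pvM1 matrix)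
def pvM3 (matrix : List (List Int)) : List (List Int) :=
  if (List.range (matrix.headD []).length).any (fun c => pvGet matrix 0 c == 1) then
    (List.range (matrix.headD []).length).foldl
      (fun m c => m.modify 0 (fun row => row.set c 1)) (pvM2 matrix)
  else pvM2 matrix
def pvM4 (matrix : List (List Int)) : List (List Int) :=
  if (List.range matrix.length).any (fun r => pvGet matrix r 0 == 1) then
    (List.range matrix.length).foldl
      (fun m r => m.modify r (fun row => row.set 0 1)) (pvM3 matrix)
  else pvM3 matrix

theorem pv_alt_eq (matrix : List (List Int)) :
    boolean_matrix_alt matrix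
      = if matrix.isEmpty || (matrix.headD []).isEmpty then matrix else pvM4 matrix := rfl

-- B satisfies the characterisation
theorem pv_char_alt (matrix : List (List Int)) (hpre : Pre_boolean_matrix matrix) :
    pvChar matrix (boolean_matrix_alt matrix) := by
  obtain ⟨hne, hrows⟩ := hpre
  have hCle : ∀ i, i < matrix.length → (matrix.headD []).length ≤ (matrix.getD i []).length := by
    intro i hi
    rw [List.getD_eq_getElem _ _ hi]
    exact hrows _ (List.getElem_mem _)
  have hlen1 : 1 ≤ matrix.length := by
    cases matrix with
    | nil => exact absurd rfl hne
    | cons a l => simp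
  rw [pv_alt_eq]
  by_cases hE : (matrix.isEmpty || (matrix.headD []).isEmpty) = true
  · rw [if_pos hE]
    have hC0 : (matrix.headD []).length = 0 := by
      rcases (Bool.or_eq_true _ _).mp hE with h | h
      · exact absurd (List.isEmpty_iff.mp h) hne
      · rw [List.isEmpty_iff.mp h]; rfl
    refine ⟨rfl, fun i => rfl, fun i j hi hj => ?_⟩
    rw [if_neg (fun h => by rw [hC0] at h; exact absurd h.1 (by omega))]
  · rw [if_neg hE]
    have hC1 : 1 ≤ (matrix.headD []).length := by
      simp only [Bool.or_eq_true, not_or] at hE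
      have hh : matrix.headD [] ≠ [] := by
        intro hh; exact hE.2 (by rw [hh]; rfl)
      have := List.length_pos_iff.mpr hh
      omega
    have hrsH : ∀ r ∈ List.range' 1 (matrix.length - 1), 1 ≤ r ∧ r < matrix.length := by
      intro r hr; rw [List.mem_range'_1] at hr; omega
    have hcsH : ∀ c ∈ List.range' 1 ((matrix.headD []).length - 1),
        1 ≤ c ∧ c < (matrix.headD []).length := by
      intro c hc; rw [List.mem_range'_1] at hc; omega
    have h1 : pvShape matrix (pvM1 matrix) ∧
        (∀ i j, 1 ≤ i → 1 ≤ j → pvGet (pvM1 matrix) i j = pvGet matrix i j) ∧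
        (∀ i j, pvGet (pvM1 matrix) i j =
          if (i ∈ List.range' 1 (matrix.length - 1) ∧ j = 0 ∧
                (List.range' 1 ((matrix.headD []).length - 1)).any
                  (fun c => pvGet matrix i c == 1) = true)
             ∨ (i = 0 ∧ j ∈ List.range' 1 ((matrix.headD []).length - 1) ∧
                (List.range' 1 (matrix.length - 1)).any
                  (fun r => pvGet matrix r j == 1) = true)
          then 1 else pvGet matrix i j) := by
      unfold pvM1
      exact pv_outer1 matrix hne hCle _ hrsH _ hcsH matrix ⟨rfl, fun i => rfl⟩
        (fun i j _ _ => rfl)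
    have h2 : pvShape matrix (pvM2 matrix) ∧
        (∀ i j, pvGet (pvM2 matrix) i j =
          if i ∈ List.range' 1 (matrix.length - 1) ∧
              j ∈ List.range' 1 ((matrix.headD []).length - 1) ∧
              (pvGet (pvM1 matrix) i 0 == 1 || pvGet (pvM1 matrix) 0 j == 1) = true
          then 1 else pvGet (pvM1 matrix) i j) := by
      unfold pvM2
      exact pv_outer2 matrix (pvM1 matrix) hCle _ hrsH _ hcsH (pvM1 matrix) h1.1
        (fun i j _ => rfl)
    have h3 : pvShape matrix (pvM3 matrix) ∧
        (∀ i j, pvGet (pvM3 matrix) i j =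
          if ((List.range (matrix.headD []).length).any
                (fun c => pvGet matrix 0 c == 1)) = true ∧ i = 0 ∧
              j ∈ List.range (matrix.headD []).length
          then 1 else pvGet (pvM2 matrix) i j) := by
      unfold pvM3
      by_cases hFR : ((List.range (matrix.headD []).length).any
          (fun c => pvGet matrix 0 c == 1)) = true
      · rw [if_pos hFR]
        obtain ⟨fs, fg⟩ := pv_fill_row matrix (List.range (matrix.headD []).length)
          (fun c hc => List.mem_range.mp hc) (by omega) (pvM2 matrix) h2.1
        refine ⟨fs, fun i j => ?_⟩
        rw [fg i j]
        refine if_congr ?_ rfl rfl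
        constructor
        · rintro ⟨g1, g2⟩; exact ⟨hFR, g1, g2⟩
        · rintro ⟨-, g1, g2⟩; exact ⟨g1, g2⟩
      · rw [if_neg hFR]
        refine ⟨h2.1, fun i j => ?_⟩
        rw [if_neg (fun h => hFR h.1)]
    have h4 : pvShape matrix (pvM4 matrix) ∧
        (∀ i j, pvGet (pvM4 matrix) i j =
          if ((List.range matrix.length).any (fun r => pvGet matrix r 0 == 1)) = true ∧
              j = 0 ∧ i ∈ List.range matrix.length
          then 1 else pvGet (pvM3 matrix) i j) := by
      unfold pvM4
      by_cases hFC : ((List.range matrix.length).any (fun r => pvGet matrix r 0 == 1)) = true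
      · rw [if_pos hFC]
        obtain ⟨fs, fg⟩ := pv_fill_col matrix (List.range matrix.length)
          (fun r hr => ⟨List.mem_range.mp hr, by
            have := hCle r (List.mem_range.mp hr); omega⟩) (pvM3 matrix) h3.1
        refine ⟨fs, fun i j => ?_⟩
        rw [fg i j]
        refine if_congr ?_ rfl rfl
        constructor
        · rintro ⟨g1, g2⟩; exact ⟨hFC, g1, g2⟩
        · rintro ⟨-, g1, g2⟩; exact ⟨g1, g2⟩
      · rw [if_neg hFC]
        refine ⟨h3.1, fun i j => ?_⟩
        rw [if_neg (fun h => hFC h.1)]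
    -- marker values after pass 1
    have hm1r0 : ∀ r, 1 ≤ r → r < matrix.length →
        (pvGet (pvM1 matrix) r 0 == 1) = pvRowHas matrix (matrix.headD []).length r := by
      intro r g1 g2
      rw [h1.2.2 r 0, pv_rowHas_split matrix _ r hC1]
      by_cases hcany : ((List.range' 1 ((matrix.headD []).length - 1)).any
          (fun c => pvGet matrix r c == 1)) = true
      · rw [if_pos (Or.inl ⟨List.mem_range'_1.mpr ⟨g1, by omega⟩, rfl, hcany⟩), hcany]
        simp
      · have hneg : ¬((r ∈ List.range' 1 (matrix.length - 1) ∧ (0:Nat) = 0 ∧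
            ((List.range' 1 ((matrix.headD []).length - 1)).any
              (fun c => pvGet matrix r c == 1)) = true)
            ∨ (r = 0 ∧ (0:Nat) ∈ List.range' 1 ((matrix.headD []).length - 1) ∧
            ((List.range' 1 (matrix.length - 1)).any
              (fun r => pvGet matrix r 0 == 1)) = true)) := by
          rintro (⟨-, -, hc⟩ | ⟨h0, -, -⟩)
          · exact hcany hc
          · omega
        have hfalse : ((List.range' 1 ((matrix.headD []).length - 1)).any
            (fun c => pvGet matrix r c == 1)) = false := by simpa using hcany
        rw [if_neg hneg, hfalse]
        simp
    have hm10c : ∀ c, 1 ≤ c → c < (matrix.headD []).length →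
        (pvGet (pvM1 matrix) 0 c == 1) = pvColHas matrix c := by
      intro c g1 g2
      rw [h1.2.2 0 c, pv_colHas_split matrix c hne]
      by_cases hrany : ((List.range' 1 (matrix.length - 1)).any
          (fun r => pvGet matrix r c == 1)) = true
      · rw [if_pos (Or.inr ⟨rfl, List.mem_range'_1.mpr ⟨g1, by omega⟩, hrany⟩), hrany]
        simp
      · have hneg : ¬(((0:Nat) ∈ List.range' 1 (matrix.length - 1) ∧ c = 0 ∧
            ((List.range' 1 ((matrix.headD []).length - 1)).any
              (fun c' => pvGet matrix 0 c' == 1)) = true)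
            ∨ ((0:Nat) = 0 ∧ c ∈ List.range' 1 ((matrix.headD []).length - 1) ∧
            ((List.range' 1 (matrix.length - 1)).any
              (fun r => pvGet matrix r c == 1)) = true)) := by
          rintro (⟨h0, -, -⟩ | ⟨-, -, hr⟩)
          · rw [List.mem_range'_1] at h0; omega
          · exact hrany hr
        have hfalse : ((List.range' 1 (matrix.length - 1)).any
            (fun r => pvGet matrix r c == 1)) = false := by simpa using hrany
        rw [if_neg hneg, hfalse]
        simp
    -- negative extraction from the saved booleans
    have hFRfalse : pvRowHas matrix (matrix.headD []).length 0 = false →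
        ∀ j, j < (matrix.headD []).length → (pvGet matrix 0 j == 1) = false := by
      intro h j hj
      unfold pvRowHas at h
      rw [List.any_eq_false] at h
      exact Bool.eq_false_iff.mpr (h j (List.mem_range.mpr hj))
    have hFCfalse : pvColHas matrix 0 = false →
        ∀ i, i < matrix.length → (pvGet matrix i 0 == 1) = false := by
      intro h i hi
      unfold pvColHas at h
      rw [List.any_eq_false] at h
      have := h (matrix.getD i [])
        (by rw [List.getD_eq_getElem _ _ hi]; exact List.getElem_mem _)
      exact Bool.eq_false_iff.mpr this
    have hFCb : ((List.range matrix.length).any (fun r => pvGet matrix r 0 == 1))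
        = pvColHas matrix 0 := pv_range_any matrix (fun row => row.getD 0 0 == 1)
    have hFRb : ((List.range (matrix.headD []).length).any (fun c => pvGet matrix 0 c == 1))
        = pvRowHas matrix (matrix.headD []).length 0 := rfl
    refine ⟨h4.1.1, h4.1.2, ?_⟩
    intro i j hi hj
    rw [h4.2 i j, h3.2 i j, hFCb, hFRb]
    have hnotrs0 : (0:Nat) ∉ List.range' 1 (matrix.length - 1) := by
      rw [List.mem_range'_1]; omega
    have hnotcs0 : (0:Nat) ∉ List.range' 1 ((matrix.headD []).length - 1) := by
      rw [List.mem_range'_1]; omega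
    have hmemrs : ∀ k, 1 ≤ k → k < matrix.length → k ∈ List.range' 1 (matrix.length - 1) :=
      fun k a b => List.mem_range'_1.mpr ⟨a, by omega⟩
    have hmemcs : ∀ k, 1 ≤ k → k < (matrix.headD []).length →
        k ∈ List.range' 1 ((matrix.headD []).length - 1) :=
      fun k a b => List.mem_range'_1.mpr ⟨a, by omega⟩
    have hnotcs : ∀ k, ¬ k < (matrix.headD []).length →
        k ∉ List.range' 1 ((matrix.headD []).length - 1) :=
      fun k h hk => h ((hcsH k hk).2)
    by_cases hi0 : i = 0
    · subst hi0
      by_cases hjC : j < (matrix.headD []).length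
      · by_cases hj0 : j = 0
        · subst hj0
          by_cases hFC : pvColHas matrix 0 = true
          · rw [if_pos ⟨hFC, rfl, List.mem_range.mpr hi⟩,
                if_pos ⟨hjC, by rw [hFC]; simp⟩]
          · rw [if_neg (fun h => hFC h.1)]
            by_cases hFR : pvRowHas matrix (matrix.headD []).length 0 = true
            · rw [if_pos ⟨hFR, rfl, List.mem_range.mpr hjC⟩,
                  if_pos ⟨hjC, by rw [hFR]; simp⟩]
            · rw [if_neg (fun h => hFR h.1)]
              have e2 : pvGet (pvM2 matrix) 0 0 = pvGet (pvM1 matrix) 0 0 := by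
                rw [h2.2 0 0, if_neg (fun h => hnotrs0 h.1)]
              have e1 : pvGet (pvM1 matrix) 0 0 = pvGet matrix 0 0 := by
                rw [h1.2.2 0 0, if_neg ?_]
                rintro (⟨h0, -, -⟩ | ⟨-, h0, -⟩)
                · exact hnotrs0 h0
                · exact hnotcs0 h0
              rw [e2, e1, if_neg ?_]
              rintro ⟨-, hor⟩
              rcases (Bool.or_eq_true _ _).mp hor with h | h
              · exact hFR h
              · exact hFC h
        · -- i = 0, 1 ≤ j < C
          have hj1 : 1 ≤ j := by omega
          rw [if_neg (fun h => hj0 h.2.1)]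
          by_cases hFR : pvRowHas matrix (matrix.headD []).length 0 = true
          · rw [if_pos ⟨hFR, rfl, List.mem_range.mpr hjC⟩,
                if_pos ⟨hjC, by rw [hFR]; simp⟩]
          · rw [if_neg (fun h => hFR h.1)]
            have e2 : pvGet (pvM2 matrix) 0 j = pvGet (pvM1 matrix) 0 j := by
              rw [h2.2 0 j, if_neg (fun h => hnotrs0 h.1)]
            rw [e2, h1.2.2 0 j]
            by_cases hrany : ((List.range' 1 (matrix.length - 1)).any
                (fun r => pvGet matrix r j == 1)) = true
            · rw [if_pos (Or.inr ⟨rfl, hmemcs j hj1 hjC, hrany⟩),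
                  if_pos ⟨hjC, by
                    rw [pv_colHas_split matrix j hne, hrany]; simp⟩]
            · rw [if_neg ?_, if_neg ?_]
              · rintro ⟨-, hor⟩
                rcases (Bool.or_eq_true _ _).mp hor with h | h
                · exact hFR h
                · rw [pv_colHas_split matrix j hne,
                      hFRfalse (Bool.eq_false_iff.mpr hFR) j hjC,
                      (by simpa using hrany : ((List.range' 1 (matrix.length - 1)).any
                        (fun r => pvGet matrix r j == 1)) = false)] at h
                  simp at h
              · rintro (⟨h0, -, -⟩ | ⟨-, -, hr⟩)
                · exact hnotrs0 h0
                · exact hrany hr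
      · -- i = 0, j ≥ C
        rw [if_neg (fun h => by omega : ¬(pvColHas matrix 0 = true ∧ j = 0 ∧
              (0:Nat) ∈ List.range matrix.length)),
            if_neg (fun h => hjC (List.mem_range.mp h.2.2))]
        have e2 : pvGet (pvM2 matrix) 0 j = pvGet (pvM1 matrix) 0 j := by
          rw [h2.2 0 j, if_neg (fun h => hnotrs0 h.1)]
        have e1 : pvGet (pvM1 matrix) 0 j = pvGet matrix 0 j := by
          rw [h1.2.2 0 j, if_neg ?_]
          rintro (⟨h0, -, -⟩ | ⟨-, h0, -⟩)
          · exact hnotrs0 h0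
          · exact hnotcs j hjC h0
        rw [e2, e1, if_neg (fun h => hjC h.1)]
    · -- i ≥ 1
      have hi1 : 1 ≤ i := by omega
      by_cases hj0 : j = 0
      · subst hj0
        by_cases hFC : pvColHas matrix 0 = true
        · rw [if_pos ⟨hFC, rfl, List.mem_range.mpr hi⟩,
              if_pos ⟨by omega, by rw [hFC]; simp⟩]
        · rw [if_neg (fun h => hFC h.1), if_neg (fun h => hi0 h.2.1)]
          have e2 : pvGet (pvM2 matrix) i 0 = pvGet (pvM1 matrix) i 0 := by
            rw [h2.2 i 0, if_neg (fun h => hnotcs0 h.2.1)]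
          rw [e2, h1.2.2 i 0]
          by_cases hcany : ((List.range' 1 ((matrix.headD []).length - 1)).any
              (fun c => pvGet matrix i c == 1)) = true
          · rw [if_pos (Or.inl ⟨hmemrs i hi1 hi, rfl, hcany⟩),
                if_pos ⟨by omega, by
                  rw [pv_rowHas_split matrix _ i hC1, hcany]; simp⟩]
          · rw [if_neg ?_, if_neg ?_]
            · rintro ⟨-, hor⟩
              rcases (Bool.or_eq_true _ _).mp hor with h | h
              · rw [pv_rowHas_split matrix _ i hC1,
                    hFCfalse (Bool.eq_false_iff.mpr hFC) i hi,
                    (by simpa using hcany : ((List.range' 1 ((matrix.headD []).length - 1)).any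
                      (fun c => pvGet matrix i c == 1)) = false)] at h
                simp at h
              · exact hFC h
            · rintro (⟨-, -, hc⟩ | ⟨h0, -, -⟩)
              · exact hcany hc
              · exact hi0 h0
      · -- i ≥ 1, j ≥ 1
        have hj1 : 1 ≤ j := by omega
        rw [if_neg (fun h => hj0 h.2.1), if_neg (fun h => hi0 h.2.1)]
        by_cases hjC : j < (matrix.headD []).length
        · rw [h2.2 i j, hm1r0 i hi1 hi, hm10c j hj1 hjC]
          by_cases hB : (pvRowHas matrix (matrix.headD []).length i
              || pvColHas matrix j) = true
          · rw [if_pos ⟨hmemrs i hi1 hi, hmemcs j hj1 hjC, hB⟩, if_pos ⟨hjC, hB⟩]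
          · rw [if_neg (fun h => hB h.2.2), if_neg (fun h => hB h.2),
                h1.2.1 i j hi1 hj1]
        · rw [h2.2 i j, if_neg (fun h => hnotcs j hjC h.2.1),
              h1.2.1 i j hi1 hj1, if_neg (fun h => hjC h.1)]

-- ===== VERDICT (by name: the statement is the Claim_ definition above) =====
theorem boolean_matrix_spec : Claim_equal_boolean_matrix := by
  intro matrix _hdom hpre
  unfold Spec_boolean_matrix
  exact pvChar_unique matrix _ _ (pv_char_a matrix hpre) (pv_char_alt matrix hpre)
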